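-- pv_equiv track=rewrite | github.com/Leapense/problems | 32734번: Anti-Closed Subsequences/test_solution.py | is_anti_closed
-- ===== SOURCE A (Python) =====
-- def is_anti_closed(subsequence: list[int]) -> bool:
--     if not subsequence:
--         return True
--
--     s_set = set(subsequence)
--
--     for i in range(len(subsequence)):
--         for j in range(len(subsequence)):
--             x = subsequence[i]
--             y = subsequence[j]
--             target_sum = x + y
--             if target_sum in s_set:
--                 return False
--     return True
-- ===== SOURCE B (Python) =====
-- def is_anti_closed(subsequence: list[int]) -> bool:
--     # Sort the distinct values once; for each candidate target z, run the
--     # classic two-pointer sweep over the sorted array to decide whether z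
--     # is the sum of two (not necessarily distinct) elements.
--     vals = sorted(set(subsequence))
--     for z in vals:
--         lo, hi = 0, len(vals) - 1
--         while lo <= hi:
--             t = vals[lo] + vals[hi]
--             if t == z:
--                 return False
--             if t < z:
--                 lo += 1
--             else:
--                 hi -= 1
--     return True
-- ===== Notes on version B (the rewrite author's own statement) =====
-- stated objective: faster
-- what changed: A tests every ordered pair of list positions against a hash set; B sorts the distinct values once and, for each candidate target z, runs a two-pointer sweep over the sorted array to decide whether z is a sum of two elements, replacing the quadratic pair enumeration per target by a linear sweep.
import Mathlib
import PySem

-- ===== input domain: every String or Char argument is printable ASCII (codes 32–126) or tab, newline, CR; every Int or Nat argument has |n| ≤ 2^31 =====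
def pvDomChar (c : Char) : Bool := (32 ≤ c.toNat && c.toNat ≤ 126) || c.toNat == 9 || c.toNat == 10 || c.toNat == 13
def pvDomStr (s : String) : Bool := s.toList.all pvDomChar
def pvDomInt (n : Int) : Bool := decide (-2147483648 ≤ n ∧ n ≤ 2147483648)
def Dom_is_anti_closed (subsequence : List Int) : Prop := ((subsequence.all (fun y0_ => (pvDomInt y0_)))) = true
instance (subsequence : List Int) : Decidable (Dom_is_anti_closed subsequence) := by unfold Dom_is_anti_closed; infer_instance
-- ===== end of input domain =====

-- B sorts the distinct values once and decides each target with a two-pointer sweep;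
-- A scans all ordered pairs of positions against a set.

-- ===== PORT A =====
def is_anti_closed (subsequence : List Int) : Bool :=
  if subsequence = [] then true
  else
    let s_set := PySem.Set.ofList subsequence
    -- nested for-loops with early 'return False' = short-circuiting List.any over the index ranges
    !((List.range subsequence.length).any (fun i =>
        (List.range subsequence.length).any (fun j =>
          let x := (PySem.List.pyGet? subsequence (Int.ofNat i)).getD 0
          let y := (PySem.List.pyGet? subsequence (Int.ofNat j)).getD 0
          PySem.Set.contains s_set (x + y))))

-- ===== PORT B =====
-- the 'while lo <= hi' two-pointer sweep; Nat indices: Python's hi = -1 exit is the 'lo = hi & t > z' branch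
def twoPtr (vals : List Int) (z : Int) (lo hi : Nat) : Bool :=
  if h : lo ≤ hi ∧ hi < vals.length then
    let t := vals[lo]'(lt_of_le_of_lt h.1 h.2) + vals[hi]'h.2
    if t = z then true
    else if t < z then twoPtr vals z (lo + 1) hi
    else if lo < hi then twoPtr vals z lo (hi - 1) else false
  else false
termination_by hi + 1 - lo
decreasing_by all_goals omega

def is_anti_closed_alt (subsequence : List Int) : Bool :=
  let vals := PySem.List.sorted (PySem.Set.ofList subsequence) (fun x => x) false
  -- 'for z in vals: … return False' = short-circuiting any
  !(vals.any (fun z => twoPtr vals z 0 (vals.length - 1)))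

-- ===== PRECONDITION & SPEC =====
def Spec_is_anti_closed (subsequence : List Int) (out : Bool) : Prop := out = is_anti_closed_alt subsequence
instance (subsequence : List Int) (out : Bool) : Decidable (Spec_is_anti_closed subsequence out) := by unfold Spec_is_anti_closed; infer_instance

-- ===== CLAIM (what is proved, stated in full; the proofs are below) =====
def Claim_equal_is_anti_closed : Prop := ∀ (subsequence : List Int), Dom_is_anti_closed subsequence → Spec_is_anti_closed subsequence (is_anti_closed subsequence)

-- ===== LEMMAS AND PROOFS =====

-- Two-pointer correctness on a list that is ≤-sorted by index: the sweep over [lo,hi] finds a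
-- pair summing to z iff one exists with indices lo ≤ i ≤ j ≤ hi.
lemma twoPtr_spec (vals : List Int)
    (hmono : ∀ p q : Nat, p ≤ q → q < vals.length → vals.getD p 0 ≤ vals.getD q 0)
    (z : Int) : ∀ lo hi : Nat, hi < vals.length →
    (twoPtr vals z lo hi = true ↔
      ∃ i j : Nat, lo ≤ i ∧ i ≤ j ∧ j ≤ hi ∧ vals.getD i 0 + vals.getD j 0 = z) := by
  intro lo hi
  induction hn : hi + 1 - lo using Nat.strong_induction_on generalizing lo hi with
  | _ n ih =>
  intro hhi
  rw [twoPtr]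
  by_cases hle : lo ≤ hi
  · rw [dif_pos ⟨hle, hhi⟩]
    have hlo : lo < vals.length := lt_of_le_of_lt hle hhi
    have hxg : vals[lo]'hlo = vals.getD lo 0 := (List.getD_eq_getElem _ _ hlo).symm
    have hyg : vals[hi]'hhi = vals.getD hi 0 := (List.getD_eq_getElem _ _ hhi).symm
    simp only [hxg, hyg]
    by_cases heq : vals.getD lo 0 + vals.getD hi 0 = z
    · rw [if_pos heq]
      exact iff_of_true rfl ⟨lo, hi, le_refl _, hle, le_refl _, heq⟩
    · rw [if_neg heq]
      by_cases hlt : vals.getD lo 0 + vals.getD hi 0 < z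
      · rw [if_pos hlt]
        rw [ih (hi + 1 - (lo + 1)) (by omega) (lo + 1) hi rfl hhi]
        constructor
        · rintro ⟨i, j, h1, h2, h3, h4⟩; exact ⟨i, j, by omega, h2, h3, h4⟩
        · rintro ⟨i, j, h1, h2, h3, h4⟩
          refine ⟨i, j, ?_, h2, h3, h4⟩
          -- i = lo is impossible: vals[lo] + vals[j] ≤ vals[lo] + vals[hi] < z
          by_contra hc
          have hieq : i = lo := by omega
          subst hieq
          have hyle : vals.getD j 0 ≤ vals.getD hi 0 := hmono j hi h3 hhi
          omega
      · rw [if_neg hlt]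
        by_cases hlh : lo < hi
        · rw [if_pos hlh]
          rw [ih (hi - 1 + 1 - lo) (by omega) lo (hi - 1) rfl (by omega)]
          constructor
          · rintro ⟨i, j, h1, h2, h3, h4⟩; exact ⟨i, j, h1, h2, by omega, h4⟩
          · rintro ⟨i, j, h1, h2, h3, h4⟩
            refine ⟨i, j, h1, h2, ?_, h4⟩
            -- j = hi is impossible: z < vals[lo] + vals[hi] ≤ vals[i] + vals[hi]
            by_contra hc
            have hjeq : j = hi := by omega
            subst hjeq
            have hxle : vals.getD lo 0 ≤ vals.getD i 0 := hmono lo i h1 (lt_of_le_of_lt h2 hhi)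
            omega
        · rw [if_neg hlh]
          refine iff_of_false (by simp) ?_
          rintro ⟨i, j, h1, h2, h3, h4⟩
          have hieq : i = lo := by omega
          have hjeq : j = hi := by omega
          subst hieq; subst hjeq
          omega
  · rw [dif_neg (by omega)]
    refine iff_of_false (by simp) ?_
    rintro ⟨i, j, h1, h2, h3, _⟩; omega

-- A's pair-of-positions existence statement equals the plain element-level one.
lemma exists_pos_pair_iff (xs : List Int) :
    (∃ i < xs.length, ∃ j < xs.length, xs[i]?.getD 0 + xs[j]?.getD 0 ∈ xs)
    ↔ (∃ x ∈ xs, ∃ y ∈ xs, x + y ∈ xs) := by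
  constructor
  · rintro ⟨i, hi, j, hj, hmem⟩
    rw [List.getElem?_eq_getElem hi, List.getElem?_eq_getElem hj] at hmem
    exact ⟨xs[i], List.getElem_mem hi, xs[j], List.getElem_mem hj, by simpa using hmem⟩
  · rintro ⟨x, hx, y, hy, hmem⟩
    obtain ⟨i, hi, hxi⟩ := List.getElem_of_mem hx
    obtain ⟨j, hj, hyj⟩ := List.getElem_of_mem hy
    refine ⟨i, hi, j, hj, ?_⟩
    rw [List.getElem?_eq_getElem hi, List.getElem?_eq_getElem hj]
    simpa [hxi, hyj] using hmem

-- The element-level statement equals B's: a target z ∈ vals hit by an index pair i ≤ j in vals.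
lemma exists_elem_iff_indexed (xs : List Int) (vals : List Int)
    (hvals : ∀ a : Int, a ∈ vals ↔ a ∈ xs) :
    (∃ x ∈ xs, ∃ y ∈ xs, x + y ∈ xs)
    ↔ (∃ z ∈ vals, ∃ i j : Nat, 0 ≤ i ∧ i ≤ j ∧ j ≤ vals.length - 1 ∧
          vals.getD i 0 + vals.getD j 0 = z) := by
  constructor
  · rintro ⟨x, hx, y, hy, hmem⟩
    obtain ⟨i, hi, hxi⟩ := List.getElem_of_mem ((hvals x).mpr hx)
    obtain ⟨j, hj, hyj⟩ := List.getElem_of_mem ((hvals y).mpr hy)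
    refine ⟨x + y, (hvals _).mpr hmem, ?_⟩
    rcases Nat.le_total i j with h | h
    · exact ⟨i, j, Nat.zero_le _, h, by omega,
        by rw [List.getD_eq_getElem _ _ hi, List.getD_eq_getElem _ _ hj, hxi, hyj]⟩
    · exact ⟨j, i, Nat.zero_le _, h, by omega,
        by rw [List.getD_eq_getElem _ _ hj, List.getD_eq_getElem _ _ hi, hxi, hyj]; ring⟩
  · rintro ⟨z, hz, i, j, _, hij, hjle, hsum⟩
    have hne : vals ≠ [] := by rintro rfl; simp at hz
    have hjlt : j < vals.length := by
      have : 0 < vals.length := List.length_pos_iff.mpr hne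
      omega
    have hilt : i < vals.length := lt_of_le_of_lt hij hjlt
    rw [List.getD_eq_getElem _ _ hilt, List.getD_eq_getElem _ _ hjlt] at hsum
    exact ⟨vals[i], (hvals _).mp (List.getElem_mem hilt),
           vals[j], (hvals _).mp (List.getElem_mem hjlt),
           by rw [hsum]; exact (hvals _).mp hz⟩

-- ===== VERDICT (by name: the statement is the Claim_ definition above) =====
theorem is_anti_closed_spec : Claim_equal_is_anti_closed := by
  intro xs _
  unfold Spec_is_anti_closed is_anti_closed is_anti_closed_alt
  set vals := PySem.List.sorted (PySem.Set.ofList xs) (fun x => x) false with hv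
  have hmem : ∀ a : Int, a ∈ vals ↔ a ∈ xs := by
    intro a
    rw [hv, PySem.List.mem_sorted, PySem.Set.mem_ofList]
  have hmono : ∀ p q : Nat, p ≤ q → q < vals.length → vals.getD p 0 ≤ vals.getD q 0 := by
    intro p q hpq hq
    rw [List.getD_eq_getElem _ _ (lt_of_le_of_lt hpq hq), List.getD_eq_getElem _ _ hq]
    exact PySem.List.sorted_id_getElem_mono (PySem.Set.ofList xs) hpq (hv ▸ hq)
  by_cases hnil : xs = []
  · subst hnil; decide
  · simp only [if_neg hnil]
    refine congrArg (fun b => !b) ?_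
    rw [Bool.eq_iff_iff]
    have htw : ∀ z ∈ vals, (twoPtr vals z 0 (vals.length - 1) = true ↔
        ∃ i j : Nat, 0 ≤ i ∧ i ≤ j ∧ j ≤ vals.length - 1 ∧
          vals.getD i 0 + vals.getD j 0 = z) := by
      intro z hz
      have hne : vals ≠ [] := by rintro h; rw [h] at hz; simp at hz
      have hlen : 0 < vals.length := List.length_pos_iff.mpr hne
      exact twoPtr_spec vals hmono z 0 (vals.length - 1) (by omega)
    calc (List.range xs.length).any (fun i => (List.range xs.length).any (fun j =>
            PySem.Set.contains (PySem.Set.ofList xs)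
              ((PySem.List.pyGet? xs (Int.ofNat i)).getD 0 + (PySem.List.pyGet? xs (Int.ofNat j)).getD 0))) = true
        ↔ (∃ x ∈ xs, ∃ y ∈ xs, x + y ∈ xs) := by
          rw [← exists_pos_pair_iff]
          simp [List.any_eq_true, PySem.Set.mem_ofList,
                PySem.List.pyGet?_natCast]
      _ ↔ vals.any (fun z => twoPtr vals z 0 (vals.length - 1)) = true := by
          rw [exists_elem_iff_indexed xs vals hmem]
          rw [List.any_eq_true]
          exact exists_congr fun z => and_congr_right fun hz => (htw z hz).symm
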